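-- pv_equiv track=rewrite | github.com/chhanish/eai-2 | part1/raichu.py | leadByStrength
-- ===== SOURCE A (Python) =====
-- class Pieces:
--     def __init__(self, id):
--         self.id = id
--         self.teamA={'w':10,"W":20,'@':50,}
--         self.teamB={"B":20,"b":10,'$':50,}
--         self.order={
--             10:[(1,1),(1,-1),],
--             20:[(0,-1),(0,1),(1,0),],
--             50:[(0,1),(0,-1),(-1,0),(1,0),(1,-1),(-1,-1),(-1,1),(1,1),]
--             }
--         self.stepLimit={
--             10:1,
--             20:2,
--             50:float('inf')
--         }
--         self.myTeamOrder=self.teamA if self.id in self.teamA.keys() else self.teamB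
--         self.myTeam=self.myTeamOrder.keys()
--         self.myRank=self.myTeamOrder[self.id]
--         self.opponent= self.teamB if self.id in list(self.teamA) else self.teamA
--
--         # successor piece when pichu or pikachu reaches the other end
--     def successor(self):
--         return max(self.myTeamOrder, key=self.myTeamOrder.get)
--
--         # check if the piece can kill the given piece
--     def canKill(self,piece):
--         if piece in self.myTeam:
--             return False
--         return self.myRank>=self.opponent[piece]
--
--         # return all movements for the piece
--     def movements(self):
--         if 'b' in self.myTeam and self.myRank<=20:
--             return [(-x,-y) for x, y in self.order[self.myRank]]
--
--         else:
--             return self.order[self.myRank]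
--
--         # max steps the piece can take
--     def maxSteps(self):
--         return self.stepLimit[self.myRank]
--         # other end for the given player
--     def otherEnd(self,size):
--         return size-1 if self.id in list(self.teamA) else 0
--
-- def matrixToString(board):
--     return "".join([c for r in board for c in r])
--
-- def leadByStrength(state,maxPlayer):
--     stringBoard=matrixToString(state)
--     playerA=Pieces('w')
--     playerB=Pieces('b')
--     strengthA=sum([stringBoard.count(p)*playerA.teamA[p] for p in list( playerA.myTeam)])
--     strengthB=sum([stringBoard.count(p)*playerB.teamB[p] for p in list( playerB.myTeam)])
--
--     if maxPlayer=='w':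
--         return strengthA-strengthB
--     else:
--         return strengthB-strengthA
-- ===== SOURCE B (Python) =====
-- _VALUE = {'w': 10, 'W': 20, '@': 50, 'b': -10, 'B': -20, '$': -50}
--
-- def leadByStrength(state, maxPlayer):
--     total = 0
--     for row in state:
--         for cell in row:
--             for ch in cell:
--                 total += _VALUE.get(ch, 0)
--     return total if maxPlayer == 'w' else -total
-- ===== Notes on version B (the rewrite author's own statement) =====
-- stated objective: simpler
-- what changed: Replaced board flattening to a string plus six per-piece count scans (and the Pieces class machinery) with a single cell-by-cell pass accumulating a signed value per character from one map, negating at the end for the 'b' player.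
import Mathlib
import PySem

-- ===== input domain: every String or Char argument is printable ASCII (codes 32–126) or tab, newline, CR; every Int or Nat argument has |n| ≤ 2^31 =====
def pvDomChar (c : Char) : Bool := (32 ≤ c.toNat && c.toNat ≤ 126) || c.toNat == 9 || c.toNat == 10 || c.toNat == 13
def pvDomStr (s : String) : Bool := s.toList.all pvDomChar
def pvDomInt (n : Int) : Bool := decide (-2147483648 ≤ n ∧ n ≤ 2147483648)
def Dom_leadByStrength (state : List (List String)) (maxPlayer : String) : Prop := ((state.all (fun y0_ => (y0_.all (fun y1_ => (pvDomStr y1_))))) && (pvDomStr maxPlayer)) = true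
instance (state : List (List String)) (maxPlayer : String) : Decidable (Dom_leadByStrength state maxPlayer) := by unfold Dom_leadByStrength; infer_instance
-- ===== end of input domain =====

-- B replaces the six per-piece count scans over a joined board string with one
-- cell-by-cell pass that accumulates a signed value per character (objective: simpler).

-- ===== PORT A =====
-- matrixToString: "".join([c for r in board for c in r])
def pvMatrixToString (board : List (List String)) : String :=
  PySem.Str.join "" (board.flatMap (fun r => r))

def leadByStrength (state : List (List String)) (maxPlayer : String) : Int :=
  let stringBoard := pvMatrixToString state
  -- Pieces('w').teamA and Pieces('b').teamB as association lists in insertion order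
  let teamA : List (Char × Int) := [('w', 10), ('W', 20), ('@', 50)]
  let teamB : List (Char × Int) := [('B', 20), ('b', 10), ('$', 50)]
  let strengthA : Int := (teamA.map (fun pv => (PySem.Str.count stringBoard (String.ofList [pv.1]) : Int) * pv.2)).sum
  let strengthB : Int := (teamB.map (fun pv => (PySem.Str.count stringBoard (String.ofList [pv.1]) : Int) * pv.2)).sum
  if maxPlayer = "w" then strengthA - strengthB else strengthB - strengthA

-- ===== PORT B =====
def pvVal (c : Char) : Int :=
  if c = 'w' then 10 else if c = 'W' then 20 else if c = '@' then 50
  else if c = 'b' then -10 else if c = 'B' then -20 else if c = '$' then -50 else 0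

def leadByStrength_alt (state : List (List String)) (maxPlayer : String) : Int :=
  let total := state.foldl (fun acc row =>
    row.foldl (fun acc cell =>
      cell.toList.foldl (fun acc ch => acc + pvVal ch) acc) acc) 0
  if maxPlayer = "w" then total else -total

-- ===== PRECONDITION & SPEC =====
def Spec_leadByStrength (state : List (List String)) (maxPlayer : String) (out : Int) : Prop := out = leadByStrength_alt state maxPlayer
instance (state : List (List String)) (maxPlayer : String) (out : Int) : Decidable (Spec_leadByStrength state maxPlayer out) := by unfold Spec_leadByStrength; infer_instance

-- ===== CLAIM (what is proved, stated in full; the proofs are below) =====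
def Claim_equal_leadByStrength : Prop := ∀ (state : List (List String)) (maxPlayer : String), Dom_leadByStrength state maxPlayer → Spec_leadByStrength state maxPlayer (leadByStrength state maxPlayer)

-- ===== LEMMAS AND PROOFS =====

-- single-character substring count is character count
theorem count_go_single (c : Char) (l : List Char) (fuel acc : Nat) (h : l.length ≤ fuel) :
    PySem.Chars.count.go [c] fuel l acc = acc + l.count c := by
  induction l generalizing fuel acc with
  | nil => cases fuel <;> simp [PySem.Chars.count.go]
  | cons hd tl ih =>
    cases fuel with
    | zero => simp at h
    | succ n =>
      simp only [PySem.Chars.count.go, List.isPrefixOf, Bool.and_true]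
      by_cases hc : c = hd
      · subst hc
        simp only [beq_self_eq_true, if_true, List.length_singleton, List.drop_succ_cons,
          List.drop_zero]
        rw [ih n (acc + 1) (by simpa using h)]
        simp
        omega
      · have hb : (c == hd) = false := by simpa using hc
        simp only [hb, Bool.false_eq_true, if_false]
        rw [ih n acc (by simpa using h)]
        simp [Ne.symm hc]

theorem chars_count_single (l : List Char) (c : Char) :
    PySem.Chars.count l [c] = l.count c := by
  have := count_go_single c l l.length 0 le_rfl
  simpa [PySem.Chars.count] using this

-- the value sum over a char list equals A's weighted count combination
theorem val_sum_eq_counts (l : List Char) :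
    (l.map pvVal).sum =
      ((l.count 'w' : Int) * 10 + (l.count 'W' : Int) * 20 + (l.count '@' : Int) * 50)
      - ((l.count 'B' : Int) * 20 + (l.count 'b' : Int) * 10 + (l.count '$' : Int) * 50) := by
  induction l with
  | nil => simp
  | cons hd tl ih =>
    simp only [List.map_cons, List.sum_cons, ih, List.count_cons]
    by_cases h1 : hd = 'w' <;> by_cases h2 : hd = 'W' <;> by_cases h3 : hd = '@' <;>
      by_cases h4 : hd = 'b' <;> by_cases h5 : hd = 'B' <;> by_cases h6 : hd = '$' <;>
      simp_all [pvVal] <;> ring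

-- B's nested foldl is the value sum over the concatenated characters
theorem alt_total_eq (state : List (List String)) :
    state.foldl (fun acc row =>
      row.foldl (fun acc cell =>
        cell.toList.foldl (fun acc ch => acc + pvVal ch) acc) acc) 0
    = ((((state.flatMap (fun r => r)).map String.toList).flatten).map pvVal).sum := by
  simp only [PySem.List.foldl_add, zero_add]
  simp [List.map_flatten, List.sum_flatten, List.flatMap_def, Function.comp_def]

theorem flatten_intersperse_nil (xs : List (List Char)) :
    (List.intersperse [] xs).flatten = xs.flatten := by
  induction xs with
  | nil => simp
  | cons a t ih => cases t <;> simp_all [List.intersperse]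

-- the joined board string's characters are exactly the concatenated cells' characters
theorem matrixToString_toList (board : List (List String)) :
    (pvMatrixToString board).toList = ((board.flatMap (fun r => r)).map String.toList).flatten := by
  simp [pvMatrixToString, PySem.Str.join, PySem.Chars.join, String.toList_ofList,
    List.intercalate, flatten_intersperse_nil]

-- ===== VERDICT (by name: the statement is the Claim_ definition above) =====
theorem leadByStrength_spec : Claim_equal_leadByStrength := by
  intro state maxPlayer _
  unfold Spec_leadByStrength leadByStrength leadByStrength_alt
  simp only [PySem.Str.count_eq, matrixToString_toList, String.toList_ofList,
    chars_count_single, alt_total_eq]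
  set l := ((state.flatMap (fun r => r)).map String.toList).flatten with hl
  have hv := val_sum_eq_counts l
  by_cases h : maxPlayer = "w" <;> simp [h, List.map, List.sum_cons, hv] <;> ring
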